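-- pv_equiv track=rewrite | github.com/jm1261/Fantasy-F1-League | src/analysis.py | managers_counts
-- ===== SOURCE A (Python) =====
-- def managers_counts(team_counts : dict,
--                     completed_races : list) -> tuple[dict, dict]:
--     """
--     Function Details
--     ================
--     Count manager usage from individual team uses.
--
--     Parameters
--     ----------
--     team_counts: dictionary
--         Team counts dictionary.
--     completed_races: list
--         List of races for which driver points and team points exist.
--
--     Returns
--     -------
--     manager_count, manager_sum_count: dictionary
--         Manager count and sum manager counts.
--
--     See Also
--     --------
--     team_count
--
--     Notes
--     -----
--     Counts the multiple team uses for one manager.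
--
--     Example
--     -------
--     None
--
--     ----------------------------------------------------------------------------
--     Update History
--     ==============
--
--     29/02/2024
--     ----------
--     Copied and documentation updated.
--
--     """
--
--     """ Set Up Individual Counts and Total Counts """
--     manager_count = {}
--     manager_sum_count = {}
--
--     """ Loop Team Dictionaries in the Team Counts """
--     for team, team_dictionary in team_counts.items():
--
--         """ Loop Names and Counts Data """
--         for name, usage in team_dictionary.items():
--
--             """ If Name Exists, Add Counts """
--             if name in manager_count.keys():
--                 manager_count.update(
--                     {name: [x + y for x, y in zip(manager_count[name], usage)]})
--             else:
--                 manager_count.update({name: usage})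
--
--     """ Sum Counts """
--     for name, usage in manager_count.items():
--         counts = []
--         for i in range(len(completed_races)):
--             counts.append(sum(usage[0: i + 1]))
--         manager_sum_count.update({name: counts})
--     return manager_count, manager_sum_count
-- ===== SOURCE B (Python) =====
-- def managers_counts(team_counts: dict, completed_races: list) -> tuple[dict, dict]:
--     """Flatten all (name, usage) pairs, group them by manager, merge each group
--     once, and read cumulative counts off a precomputed prefix-sum table instead
--     of re-summing a growing slice per race."""
--     pairs = [(name, usage)
--              for team_dictionary in team_counts.values()
--              for name, usage in team_dictionary.items()]
--     groups = {}
--     for name, usage in pairs: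
--         groups.setdefault(name, []).append(usage)
--     manager_count = {name: _merge(usages) for name, usages in groups.items()}
--     races = len(completed_races)
--     manager_sum_count = {name: _prefix_counts(usage, races)
--                          for name, usage in manager_count.items()}
--     return manager_count, manager_sum_count
--
--
-- def _merge(usages):
--     acc = usages[0]
--     for usage in usages[1:]:
--         acc = [x + y for x, y in zip(acc, usage)]
--     return acc
--
--
-- def _prefix_counts(usage, races):
--     prefix = [0]
--     for x in usage:
--         prefix.append(prefix[-1] + x)
--     last = len(usage)
--     return [prefix[min(i + 1, last)] for i in range(races)]
-- ===== Notes on version B (the rewrite author's own statement) =====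
-- stated objective: alternative
-- what changed: B flattens all (name, usage) pairs once and groups them by manager (setdefault-append) before a single merge pass per group, and replaces A's per-race slice re-summation by one precomputed prefix-sum table per manager indexed with min(i+1, len); measured ~1.5x at the largest size, so no speed is claimed.
import Mathlib
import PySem

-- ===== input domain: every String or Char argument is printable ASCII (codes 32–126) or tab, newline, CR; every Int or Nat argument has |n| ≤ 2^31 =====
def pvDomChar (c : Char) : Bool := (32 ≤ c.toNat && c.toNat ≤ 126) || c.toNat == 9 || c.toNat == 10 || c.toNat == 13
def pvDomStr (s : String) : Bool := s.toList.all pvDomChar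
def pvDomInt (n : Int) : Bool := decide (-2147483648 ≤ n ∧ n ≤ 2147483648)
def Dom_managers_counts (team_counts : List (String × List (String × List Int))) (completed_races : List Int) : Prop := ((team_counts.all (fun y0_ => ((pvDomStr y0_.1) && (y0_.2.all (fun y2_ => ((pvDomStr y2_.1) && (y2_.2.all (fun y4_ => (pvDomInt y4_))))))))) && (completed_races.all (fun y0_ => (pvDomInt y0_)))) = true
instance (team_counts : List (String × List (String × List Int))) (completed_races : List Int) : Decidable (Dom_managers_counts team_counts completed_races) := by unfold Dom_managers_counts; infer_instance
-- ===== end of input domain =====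

-- B flattens the (name, usage) pairs, groups them by manager once, merges each group,
-- and reads the cumulative counts off one precomputed prefix-sum table per manager
-- instead of re-summing a growing slice for every race.

-- ===== PORT A =====
-- literal transliteration of A; dicts are PySem.Dict built from the association lists
def managers_counts (team_counts : List (String × List (String × List Int))) (completed_races : List Int) : (List (String × List Int)) × (List (String × List Int)) :=
  let mc : PySem.Dict String (List Int) :=
    (PySem.Dict.ofList team_counts).items.foldl (fun mc td =>
      (PySem.Dict.ofList td.2).items.foldl (fun mc p =>
        if mc.contains p.1 then
          mc.insert p.1 (((mc.getD p.1 []).zip p.2).map (fun q => q.1 + q.2))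
        else
          mc.insert p.1 p.2) mc) PySem.Dict.empty
  let msc : PySem.Dict String (List Int) :=
    mc.items.foldl (fun msc p =>
      msc.insert p.1 ((PySem.List.pyRange 0 (completed_races.length : Int) 1).foldl
        (fun counts i => counts ++ [(PySem.List.slice p.2 (some 0) (some (i + 1))).sum]) [])) PySem.Dict.empty
  (mc.items, msc.items)

-- ===== PORT B =====
-- _merge: usages[0], then fold zip-add over usages[1:]
def pvMerge (usages : List (List Int)) : List Int :=
  match usages with
  | [] => []  -- unreachable in B (groups hold at least one usage); total form
  | acc :: rest => rest.foldl (fun a u => (a.zip u).map (fun q => q.1 + q.2)) acc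

-- _prefix_counts: one prefix-sum table, then indexed reads
def pvPrefixCounts (usage : List Int) (races : Int) : List Int :=
  let pre_ := usage.foldl (fun pre x => pre ++ [PySem.List.pyGetD pre (-1) 0 + x]) [(0 : Int)]
  let last : Int := (usage.length : Int)
  (PySem.List.pyRange 0 races 1).map (fun i => PySem.List.pyGetD pre_ (min (i + 1) last) 0)

def managers_counts_alt (team_counts : List (String × List (String × List Int))) (completed_races : List Int) : (List (String × List Int)) × (List (String × List Int)) :=
  let pairs : List (String × List Int) :=
    (PySem.Dict.ofList team_counts).values.flatMap (fun td => (PySem.Dict.ofList td).items)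
  let groups : PySem.Dict String (List (List Int)) :=
    pairs.foldl (fun d p => d.modify p.1 [] (fun us => us ++ [p.2])) PySem.Dict.empty
  -- dict comprehensions over dicts with distinct keys: insertion-order maps
  let manager_count : List (String × List Int) := groups.items.map (fun g => (g.1, pvMerge g.2))
  let races : Int := (completed_races.length : Int)
  (manager_count, manager_count.map (fun p => (p.1, pvPrefixCounts p.2 races)))

-- ===== PRECONDITION & SPEC =====
def Spec_managers_counts (team_counts : List (String × List (String × List Int))) (completed_races : List Int) (out : (List (String × List Int)) × (List (String × List Int))) : Prop := out = managers_counts_alt team_counts completed_races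
instance (team_counts : List (String × List (String × List Int))) (completed_races : List Int) (out : (List (String × List Int)) × (List (String × List Int))) : Decidable (Spec_managers_counts team_counts completed_races out) := by unfold Spec_managers_counts; infer_instance

-- ===== CLAIM =====
def Claim_equal_managers_counts : Prop := ∀ (team_counts : List (String × List (String × List Int))) (completed_races : List Int), Dom_managers_counts team_counts completed_races → Spec_managers_counts team_counts completed_races (managers_counts team_counts completed_races)

-- ===== LEMMAS AND PROOFS =====

def pvF : String × List (List Int) → String × List Int := fun g => (g.1, pvMerge g.2)

-- invariant relating A's incremental merge dict to B's group dict
def pvRel (d : PySem.Dict String (List Int)) (g : PySem.Dict String (List (List Int))) : Prop :=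
  d.items = g.items.map pvF ∧ g.keys.Nodup ∧ ∀ q ∈ g.items, q.2 ≠ []

lemma pvMerge_append_singleton (us : List (List Int)) (u : List Int) (h : us ≠ []) :
    pvMerge (us ++ [u]) = ((pvMerge us).zip u).map (fun q => q.1 + q.2) := by
  cases us with
  | nil => exact absurd rfl h
  | cons a t => simp [pvMerge, List.foldl_append]

lemma pvKeys_eq {d : PySem.Dict String (List Int)} {g : PySem.Dict String (List (List Int))}
    (h : d.items = g.items.map pvF) : d.keys = g.keys := by
  simp only [PySem.Dict.keys, h, List.map_map]
  exact List.map_congr_left (fun q _ => rfl)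

lemma pvStep (d : PySem.Dict String (List Int)) (g : PySem.Dict String (List (List Int)))
    (p : String × List Int) (h : pvRel d g) :
    pvRel (if d.contains p.1 then
             d.insert p.1 (((d.getD p.1 []).zip p.2).map (fun q => q.1 + q.2))
           else d.insert p.1 p.2)
          (g.modify p.1 [] (fun us => us ++ [p.2])) := by
  obtain ⟨hi, hnd, hne⟩ := h
  have hkeys : d.keys = g.keys := pvKeys_eq hi
  have hc : d.contains p.1 = g.contains p.1 := by
    rw [PySem.Dict.contains_eq_decide_mem_keys, PySem.Dict.contains_eq_decide_mem_keys, hkeys]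
  simp only [PySem.Dict.modify]
  by_cases hcg : g.contains p.1 = true
  · rw [hc, if_pos hcg]
    refine ⟨?_, ?_, ?_⟩
    · rw [PySem.Dict.items_insert_of_contains _ _ (hc.trans hcg),
          PySem.Dict.items_insert_of_contains _ _ hcg, hi, List.map_map, List.map_map]
      apply List.map_congr_left
      intro q hq
      by_cases hqk : q.1 = p.1
      · have hmemg : (p.1, q.2) ∈ g.items := by rw [← hqk]; exact hq
        have hgv : g.getD p.1 [] = q.2 := PySem.Dict.getD_of_mem_items _ hmemg hnd []
        have hmemd : (p.1, pvMerge q.2) ∈ d.items := by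
          rw [hi]; rw [← hqk]; exact List.mem_map_of_mem hq
        have hdv : d.getD p.1 [] = pvMerge q.2 :=
          PySem.Dict.getD_of_mem_items _ hmemd (hkeys ▸ hnd) []
        simp only [Function.comp, pvF, hqk, beq_self_eq_true, if_pos]
        rw [hgv, hdv, pvMerge_append_singleton _ _ (hne q hq)]
      · simp only [Function.comp, pvF]
        rw [if_neg (by simpa using hqk), if_neg (by simpa using hqk)]
    · rw [PySem.Dict.keys_insert_of_contains _ _ hcg]; exact hnd
    · intro q hq
      rw [PySem.Dict.mem_items_insert] at hq
      rcases hq with hq | ⟨hq, _⟩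
      · subst hq; simp
      · exact hne q hq
  · have hcg' : g.contains p.1 = false := by
      cases hcgv : g.contains p.1 with
      | false => rfl
      | true => exact absurd hcgv hcg
    have hcd' : d.contains p.1 = false := hc.trans hcg'
    rw [hcd']
    simp only [Bool.false_eq_true, if_false]
    refine ⟨?_, ?_, ?_⟩
    · rw [PySem.Dict.items_insert_of_not_contains _ _ hcd',
          PySem.Dict.items_insert_of_not_contains _ _ hcg',
          PySem.Dict.getD_of_not_contains _ _ hcg', hi, List.map_append]
      simp [pvF, pvMerge]
    · rw [PySem.Dict.keys_insert_of_not_contains _ _ hcg']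
      have hnm : p.1 ∉ g.keys := by
        have := PySem.Dict.contains_eq_decide_mem_keys g p.1
        rw [hcg'] at this
        exact of_decide_eq_false this.symm
      simp [List.nodup_append, hnd]
      intro a ha hap
      exact hnm (hap ▸ ha)
    · intro q hq
      rw [PySem.Dict.items_insert_of_not_contains _ _ hcg'] at hq
      rcases List.mem_append.mp hq with hq | hq
      · exact hne q hq
      · rcases List.mem_singleton.mp hq with rfl; simp

lemma pvFold (pairs : List (String × List Int)) (d : PySem.Dict String (List Int))
    (g : PySem.Dict String (List (List Int))) (h : pvRel d g) :
    pvRel (pairs.foldl (fun mc p =>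
            if mc.contains p.1 then
              mc.insert p.1 (((mc.getD p.1 []).zip p.2).map (fun q => q.1 + q.2))
            else mc.insert p.1 p.2) d)
          (pairs.foldl (fun d p => d.modify p.1 [] (fun us => us ++ [p.2])) g) := by
  induction pairs generalizing d g with
  | nil => exact h
  | cons p rest ih => exact ih _ _ (pvStep d g p h)

-- A's prefix-slice sums equal the map of take-sums
lemma countsA_eq (usage : List Int) (n : Nat) :
    (PySem.List.pyRange 0 (n : Int) 1).foldl
        (fun counts i => counts ++ [(PySem.List.slice usage (some 0) (some (i + 1))).sum]) []
    = (List.range n).map (fun k => (usage.take (k + 1)).sum) := by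
  induction n with
  | zero => simp [PySem.List.pyRange_one_eq_nil]
  | succ m ih =>
    have hc : ((m + 1 : Nat) : Int) = (m : Int) + 1 := by push_cast; ring
    rw [hc, PySem.List.pyRange_one_succ_right (by positivity), List.foldl_append, ih,
        List.range_succ, List.map_append]
    simp only [List.foldl_cons, List.foldl_nil, List.map_cons, List.map_nil]
    congr 1
    have : ((m : Int) + 1) = ((m + 1 : Nat) : Int) := by push_cast; ring
    rw [this, PySem.List.slice_zero_start, PySem.List.slice_to_natCast]

-- B's prefix table is the list of all prefix sums
lemma pvPrefix_eq (usage : List Int) :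
    usage.foldl (fun pre x => pre ++ [PySem.List.pyGetD pre (-1) 0 + x]) [(0 : Int)]
    = (List.range (usage.length + 1)).map (fun k => (usage.take k).sum) := by
  induction usage using List.reverseRecOn with
  | nil => simp
  | append_singleton us x ih =>
    rw [List.foldl_append, ih]
    simp only [List.foldl_cons, List.foldl_nil]
    rw [List.range_succ, List.map_append, List.map_cons, List.map_nil,
        PySem.List.pyGetD_neg_one_append_singleton]
    have hL : (us ++ [x]).length + 1 = (us.length + 1) + 1 := by simp
    rw [hL, List.range_succ, List.map_append, List.map_cons, List.map_nil]
    congr 1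
    · rw [List.range_succ, List.map_append, List.map_cons, List.map_nil]
      congr 1
      · apply List.map_congr_left
        intro k hk
        rw [List.mem_range] at hk
        rw [List.take_append_of_le_length (by omega)]
      · rw [List.take_append_of_le_length (le_refl _)]
    · rw [List.take_length, List.take_of_length_le (by simp), List.sum_append]
      simp

-- B's indexed reads equal the map of take-sums
lemma pvPrefixCounts_eq (usage : List Int) (n : Nat) :
    pvPrefixCounts usage (n : Int) = (List.range n).map (fun k => (usage.take (k + 1)).sum) := by
  unfold pvPrefixCounts
  rw [pvPrefix_eq, PySem.List.pyRange_zero_natCast, List.map_map]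
  apply List.map_congr_left
  intro k _
  simp only [Function.comp]
  have hmin : min ((k : Int) + 1) ((usage.length : Int)) = ((min (k + 1) usage.length : Nat) : Int) := by
    push_cast; omega
  rw [hmin, PySem.List.pyGetD_natCast,
      PySem.List.getD_map_range _ _ _ _ (by omega : min (k + 1) usage.length < usage.length + 1)]
  rcases le_total (k + 1) usage.length with h | h
  · rw [Nat.min_eq_left h]
  · rw [Nat.min_eq_right h, List.take_length, List.take_of_length_le h]

-- ===== VERDICT =====
theorem managers_counts_spec : Claim_equal_managers_counts := by
  intro team_counts completed_races _
  show managers_counts team_counts completed_races = managers_counts_alt team_counts completed_races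
  unfold managers_counts managers_counts_alt
  simp only [PySem.Dict.values]
  -- A's nested merge loop as a single fold over the flattened pairs
  rw [show (fun (mc : PySem.Dict String (List Int)) (td : String × List (String × List Int)) =>
        (PySem.Dict.ofList td.2).items.foldl (fun mc p =>
          if mc.contains p.1 then
            mc.insert p.1 (((mc.getD p.1 []).zip p.2).map (fun q => q.1 + q.2))
          else mc.insert p.1 p.2) mc)
      = (fun mc td => ((fun td => (PySem.Dict.ofList (td : String × List (String × List Int)).2).items) td).foldl
          (fun mc p =>
            if mc.contains p.1 then
              mc.insert p.1 (((mc.getD p.1 []).zip p.2).map (fun q => q.1 + q.2))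
            else mc.insert p.1 p.2) mc) from rfl,
      ← List.foldl_flatMap]
  have hpairs : ((PySem.Dict.ofList team_counts).items.map (fun p => p.2)).flatMap
        (fun td => (PySem.Dict.ofList td).items)
      = (PySem.Dict.ofList team_counts).items.flatMap (fun td => (PySem.Dict.ofList td.2).items) := by
    rw [List.flatMap_map]
  have hrel := pvFold
    ((PySem.Dict.ofList team_counts).items.flatMap (fun td => (PySem.Dict.ofList td.2).items))
    PySem.Dict.empty PySem.Dict.empty ⟨rfl, List.nodup_nil, by intro q hq; simp [PySem.Dict.empty] at hq⟩
  obtain ⟨hitems, hnd, _⟩ := hrel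
  -- abbreviations
  set pairsL := (PySem.Dict.ofList team_counts).items.flatMap (fun td => (PySem.Dict.ofList td.2).items) with hp
  set mcA := pairsL.foldl (fun mc p =>
      if mc.contains p.1 then
        mc.insert p.1 (((mc.getD p.1 []).zip p.2).map (fun q => q.1 + q.2))
      else mc.insert p.1 p.2) PySem.Dict.empty with hmcA
  set groups := pairsL.foldl (fun d p => d.modify p.1 [] (fun us => us ++ [p.2])) PySem.Dict.empty with hg
  rw [hpairs]
  refine Prod.ext ?_ ?_
  · exact hitems
  · -- the sum-counts side
    have hfresh : (mcA.items.foldl (fun msc p =>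
          msc.insert p.1 ((PySem.List.pyRange 0 (completed_races.length : Int) 1).foldl
            (fun counts i => counts ++ [(PySem.List.slice p.2 (some 0) (some (i + 1))).sum]) []))
          PySem.Dict.empty).items
        = PySem.Dict.empty.items ++ mcA.items.map (fun p =>
            (p.1, (PySem.List.pyRange 0 (completed_races.length : Int) 1).foldl
              (fun counts i => counts ++ [(PySem.List.slice p.2 (some 0) (some (i + 1))).sum]) [])) := by
      refine PySem.Dict.items_foldl_insert_fresh mcA.items (fun p => p.1) _ PySem.Dict.empty
        (fun a _ => PySem.Dict.contains_empty _) ?_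
      have hk : mcA.items.map (fun p => p.1) = mcA.keys := rfl
      rw [hk, pvKeys_eq hitems]
      exact hnd
    rw [hfresh, hitems]
    simp only [PySem.Dict.empty, List.nil_append, List.map_map]
    apply List.map_congr_left
    intro q _
    simp only [Function.comp, pvF]
    rw [countsA_eq, pvPrefixCounts_eq]
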